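-- pv_equiv track=rewrite | github.com/rickorme/01-python-intro | veckouppgift_5/u5_balance_lists.py | balance_lists
-- ===== SOURCE A (Python) =====
-- def balance_lists(list1, list2):
--     if not list1 and not list2:
--         return 0, 0
--     elif not list1:
--         while len(list2) > len(list1) +1:
--             list1.append(list2.pop())
--     elif not list2:
--         while len(list1) > len(list2) +1:
--             list2.append(list1.pop())
--     else:
--         list1_start_len = len(list1)
--         list2_start_len = len(list2)
--         can_balance_equally = (list1_start_len - list2_start_len) % 2 == 0
--         modifier = 0 if can_balance_equally else 1
--
--         if list1_start_len > list2_start_len: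
--             while len(list1) > len(list2) + modifier:
--                 list2.append(list1.pop())
--         elif list2_start_len > list1_start_len:
--              while len(list2) > len(list1) + modifier:
--                 list1.append(list2.pop())
--
--     return len(list1), len(list2)
-- ===== SOURCE B (Python) =====
-- def balance_lists(list1, list2):
--     a, b = len(list1), len(list2)
--     t = a + b
--     hi, lo = (t + 1) // 2, t // 2
--     if a > b:
--         k = a - hi
--         list2.extend(reversed(list1[a - k:]))
--         del list1[a - k:]
--         return hi, lo
--     elif b > a:
--         k = b - hi
--         list1.extend(reversed(list2[b - k:]))
--         del list2[b - k:]
--         return lo, hi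
--     return a, b
-- ===== Notes on version B (the rewrite author's own statement) =====
-- stated objective: simpler
-- what changed: Replaced the branchy length-recomputing pop/append while loops with a closed-form target (larger side keeps ceil(T/2)) and one bulk reversed-slice transfer.
import Mathlib
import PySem

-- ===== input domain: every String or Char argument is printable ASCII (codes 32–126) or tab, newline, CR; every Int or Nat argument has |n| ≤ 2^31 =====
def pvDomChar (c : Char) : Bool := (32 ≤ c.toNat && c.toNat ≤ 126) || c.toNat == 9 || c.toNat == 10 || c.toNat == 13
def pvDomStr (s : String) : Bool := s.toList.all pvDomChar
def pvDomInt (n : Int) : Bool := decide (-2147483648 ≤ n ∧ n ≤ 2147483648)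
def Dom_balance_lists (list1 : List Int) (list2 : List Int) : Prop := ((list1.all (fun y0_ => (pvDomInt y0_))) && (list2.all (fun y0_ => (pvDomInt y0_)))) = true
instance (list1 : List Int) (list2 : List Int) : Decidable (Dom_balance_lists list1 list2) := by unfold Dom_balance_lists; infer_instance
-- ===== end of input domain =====

-- B replaces A's pop/append while loops by a closed-form length target and one bulk
-- reversed-slice transfer (simpler); equivalence proved is about the RETURN value —
-- Source B performs the same observable mutation of the argument lists, tested but not modeled here.

-- ===== PORT A =====
-- "while len(src) > len(dst) + m: dst.append(src.pop())", returning the final (src, dst)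
def popAppendLoop (src dst : List Int) (m : Nat) : List Int × List Int :=
  if h : dst.length + m < src.length then
    popAppendLoop src.dropLast (dst ++ [src.getLast (by intro hs; subst hs; simp at h)]) m
  else (src, dst)
termination_by src.length
decreasing_by simp only [List.length_dropLast]; omega

def balance_lists (list1 : List Int) (list2 : List Int) : Int × Int :=
  if list1 = [] ∧ list2 = [] then (0, 0)
  else if list1 = [] then
    -- while len(list2) > len(list1) + 1: list1.append(list2.pop())
    let r := popAppendLoop list2 list1 1
    ((r.2.length : Int), (r.1.length : Int))
  else if list2 = [] then
    let r := popAppendLoop list1 list2 1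
    ((r.1.length : Int), (r.2.length : Int))
  else
    let a : Int := list1.length
    let b : Int := list2.length
    let canBalanceEqually := PySem.Int.mod (a - b) 2 == 0
    let modifier : Nat := if canBalanceEqually then 0 else 1
    if a > b then
      let r := popAppendLoop list1 list2 modifier
      ((r.1.length : Int), (r.2.length : Int))
    else if b > a then
      let r := popAppendLoop list2 list1 modifier
      ((r.2.length : Int), (r.1.length : Int))
    else (a, b)

-- ===== PORT B =====
-- closed form: larger side keeps ceil(T/2), the other gets floor(T/2); the slice
-- move in Source B only mutates the arguments and does not affect the returned value
def balance_lists_alt (list1 : List Int) (list2 : List Int) : Int × Int :=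
  let a : Int := list1.length
  let b : Int := list2.length
  let t := a + b
  let hi := PySem.Int.floordiv (t + 1) 2
  let lo := PySem.Int.floordiv t 2
  if a > b then (hi, lo)
  else if b > a then (lo, hi)
  else (a, b)

-- ===== PRECONDITION & SPEC =====
def Spec_balance_lists (list1 : List Int) (list2 : List Int) (out : Int × Int) : Prop := out = balance_lists_alt list1 list2
instance (list1 : List Int) (list2 : List Int) (out : Int × Int) : Decidable (Spec_balance_lists list1 list2 out) := by unfold Spec_balance_lists; infer_instance

-- ===== CLAIM (what is proved, stated in full; the proofs are below) =====
def Claim_equal_balance_lists : Prop := ∀ (list1 : List Int) (list2 : List Int), Dom_balance_lists list1 list2 → Spec_balance_lists list1 list2 (balance_lists list1 list2)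

-- ===== LEMMAS AND PROOFS =====

-- final lengths when the gap s.len - (d.len + m) is even (2*j): j elements move
lemma loop_even (m : Nat) (j : Nat) : ∀ s d : List Int, s.length = d.length + m + 2 * j →
    (popAppendLoop s d m).1.length = d.length + m + j ∧
    (popAppendLoop s d m).2.length = d.length + j := by
  induction j with
  | zero =>
    intro s d h
    rw [popAppendLoop]
    simp only [dif_neg (by omega : ¬ d.length + m < s.length)]
    omega
  | succ j ih =>
    intro s d h
    rw [popAppendLoop]
    simp only [dif_pos (by omega : d.length + m < s.length)]
    have := ih s.dropLast (d ++ [s.getLast (by intro hs; subst hs; simp at h)])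
      (by simp only [List.length_dropLast, List.length_append, List.length_singleton]; omega)
    simp only [List.length_append, List.length_singleton] at this ⊢
    omega

-- with modifier 1 and an even gap s.len - d.len = 2*j, the loop overshoots by one:
-- it stops at equal lengths d.len + j on each side
lemma loop_odd1 (j : Nat) : ∀ s d : List Int, s.length = d.length + 2 * j →
    (popAppendLoop s d 1).1.length = d.length + j ∧
    (popAppendLoop s d 1).2.length = d.length + j := by
  induction j with
  | zero =>
    intro s d h
    rw [popAppendLoop]
    simp only [dif_neg (by omega : ¬ d.length + 1 < s.length)]
    omega
  | succ j ih =>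
    intro s d h
    rw [popAppendLoop]
    by_cases hc : d.length + 1 < s.length
    · simp only [dif_pos hc]
      have := ih s.dropLast (d ++ [s.getLast (by intro hs; subst hs; simp at hc)])
        (by simp only [List.length_dropLast, List.length_append, List.length_singleton]; omega)
      simp only [List.length_append, List.length_singleton] at this ⊢
      omega
    · simp only [dif_neg hc]
      omega

lemma fd2 (a : Int) : PySem.Int.floordiv a 2 = a / 2 :=
  PySem.Int.floordiv_eq_ediv_of_pos (by norm_num)

-- ===== VERDICT (by name: the statement is the Claim_ definition above) =====
theorem balance_lists_spec : Claim_equal_balance_lists := by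
  unfold Claim_equal_balance_lists
  intro l1 l2 _
  unfold Spec_balance_lists balance_lists balance_lists_alt
  by_cases h12 : l1 = [] ∧ l2 = []
  · obtain ⟨h1, h2⟩ := h12
    subst h1; subst h2
    decide
  · rw [if_neg h12]
    by_cases h1 : l1 = []
    · rw [if_pos h1]
      have h2 : l2 ≠ [] := fun h => h12 ⟨h1, h⟩
      have hb : 0 < l2.length := List.length_pos_iff.mpr h2
      subst h1
      by_cases hpar : l2.length % 2 = 0
      · obtain ⟨hA1, hA2⟩ := loop_odd1 (l2.length / 2) l2 [] (by simp; omega)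
        simp only [hA1, hA2, List.length_nil]
        simp only [fd2]
        split_ifs <;> simp only [Prod.mk.injEq] <;> constructor <;> push_cast at * <;> omega
      · obtain ⟨hA1, hA2⟩ := loop_even 1 (l2.length / 2) l2 [] (by simp; omega)
        simp only [hA1, hA2, List.length_nil]
        simp only [fd2]
        split_ifs <;> simp only [Prod.mk.injEq] <;> constructor <;> push_cast at * <;> omega
    · rw [if_neg h1]
      by_cases h2 : l2 = []
      · rw [if_pos h2]
        have ha : 0 < l1.length := List.length_pos_iff.mpr h1
        subst h2
        by_cases hpar : l1.length % 2 = 0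
        · obtain ⟨hA1, hA2⟩ := loop_odd1 (l1.length / 2) l1 [] (by simp; omega)
          simp only [hA1, hA2, List.length_nil]
          simp only [fd2]
          split_ifs <;> simp only [Prod.mk.injEq] <;> constructor <;> push_cast at * <;> omega
        · obtain ⟨hA1, hA2⟩ := loop_even 1 (l1.length / 2) l1 [] (by simp; omega)
          simp only [hA1, hA2, List.length_nil]
          simp only [fd2]
          split_ifs <;> simp only [Prod.mk.injEq] <;> constructor <;> push_cast at * <;> omega
      · rw [if_neg h2]
        set a := l1.length with ha
        set b := l2.length with hb
        have hmod : PySem.Int.mod ((a:Int) - b) 2 = ((a:Int) - b) % 2 :=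
          PySem.Int.mod_eq_emod_of_pos (by norm_num)
        simp only [hmod, fd2]
        by_cases hgt : (a:Int) > b
        · rw [if_pos hgt, if_pos hgt]
          by_cases hpar : ((a:Int) - b) % 2 = 0
          · have hm : (if (((a:Int) - b) % 2 == 0) = true then (0:Nat) else 1) = 0 := by
              simp [hpar]
            rw [hm]
            obtain ⟨hA1, hA2⟩ := loop_even 0 ((a - b) / 2) l1 l2 (by omega)
            simp only [hA1, hA2]
            simp only [Prod.mk.injEq]
            constructor <;> push_cast at * <;> omega
          · have hm : (if (((a:Int) - b) % 2 == 0) = true then (0:Nat) else 1) = 1 := by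
              simp [hpar]
            rw [hm]
            obtain ⟨hA1, hA2⟩ := loop_even 1 ((a - b - 1) / 2) l1 l2 (by omega)
            simp only [hA1, hA2]
            simp only [Prod.mk.injEq]
            constructor <;> push_cast at * <;> omega
        · rw [if_neg hgt, if_neg hgt]
          by_cases hlt : (b:Int) > a
          · rw [if_pos hlt, if_pos hlt]
            by_cases hpar : ((a:Int) - b) % 2 = 0
            · have hm : (if (((a:Int) - b) % 2 == 0) = true then (0:Nat) else 1) = 0 := by
                simp [hpar]
              rw [hm]
              obtain ⟨hA1, hA2⟩ := loop_even 0 ((b - a) / 2) l2 l1 (by omega)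
              simp only [hA1, hA2]
              simp only [Prod.mk.injEq]
              constructor <;> push_cast at * <;> omega
            · have hm : (if (((a:Int) - b) % 2 == 0) = true then (0:Nat) else 1) = 1 := by
                simp [hpar]
              rw [hm]
              obtain ⟨hA1, hA2⟩ := loop_even 1 ((b - a - 1) / 2) l2 l1 (by omega)
              simp only [hA1, hA2]
              simp only [Prod.mk.injEq]
              constructor <;> push_cast at * <;> omega
          · rw [if_neg hlt, if_neg hlt]
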